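-- pv_equiv track=rewrite | github.com/gka0903/Coding_Test | 2023/2023.02/2023.02.10/햄버거 만들기.py | solution
-- ===== SOURCE A (Python) =====
-- def solution(ingredient):
--     check_arr = [1, 2, 3, 1]
--     answer = 0
--     arr = []
--     for i in ingredient:
--         arr.append(i)
--         if len(arr) >= 4 and arr[len(arr) - 4::] == check_arr:
--             del arr[len(arr) - 4::]
--             answer += 1
--     return answer
-- ===== SOURCE B (Python) =====
-- def solution(ingredient):
--     # One pass keeping only a stack of match-progress values: each entry is the
--     # length of the longest suffix of the retained ingredients (ending at that
--     # element) that is a prefix of the pattern [1, 2, 3, 1].  No ingredient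
--     # values are stored and no slice comparison is ever made.
--     check = [1, 2, 3, 1]
--     prog = []
--     answer = 0
--     for x in ingredient:
--         p = prog[-1] if prog else 0
--         if x == check[p]:
--             new = p + 1
--         elif x == 1:
--             new = 1
--         else:
--             new = 0
--         if new == 4:
--             del prog[-3:]
--             answer += 1
--         else:
--             prog.append(new)
--     return answer
-- ===== Notes on version B (the rewrite author's own statement) =====
-- stated objective: faster
-- what changed: B replaces A's ingredient stack with a stack of KMP-style match-progress values (longest pattern-prefix length ending at each retained element), so each step is a constant-time state transition instead of re-slicing and comparing the last four stack elements against the pattern.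
import Mathlib
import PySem

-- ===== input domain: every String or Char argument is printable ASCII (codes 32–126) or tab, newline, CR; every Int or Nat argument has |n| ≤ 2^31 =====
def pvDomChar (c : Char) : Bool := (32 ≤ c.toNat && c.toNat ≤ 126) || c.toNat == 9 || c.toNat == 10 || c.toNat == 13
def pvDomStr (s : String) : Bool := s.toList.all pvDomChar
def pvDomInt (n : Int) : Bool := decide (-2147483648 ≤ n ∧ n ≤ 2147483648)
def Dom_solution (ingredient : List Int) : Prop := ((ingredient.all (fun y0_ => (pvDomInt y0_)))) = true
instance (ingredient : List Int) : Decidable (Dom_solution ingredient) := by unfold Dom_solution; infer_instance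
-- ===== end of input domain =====

-- B replaces A's ingredient stack by a stack of match-progress values (constant-time
-- state transition per element instead of a last-4 slice comparison); same results proved equal.


-- ===== PORT A =====
-- A keeps the retained ingredients in `arr`; after each append it compares the
-- last-4 slice arr[len-4:] with [1,2,3,1] and, on a match, deletes that slice.
def solutionStepA (s : List Int × Int) (i : Int) : List Int × Int :=
  let arr := s.1 ++ [i]
  if 4 ≤ arr.length ∧
      PySem.List.slice arr (some ((arr.length : Int) - 4)) none = ([1, 2, 3, 1] : List Int) then
    -- `del arr[len(arr)-4::]` keeps exactly the first len-4 elements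
    (arr.take (arr.length - 4), s.2 + 1)
  else
    (arr, s.2)

def solution (ingredient : List Int) : Int :=
  (ingredient.foldl solutionStepA ([], 0)).2

-- ===== PORT B =====
-- B's stack `prog` holds only match-progress values (head = top of stack).
-- `some x = pyGet? check p` is Python's `x == check[p]` (p is always in range here).
def solutionStepB (s : List Int × Int) (x : Int) : List Int × Int :=
  let p := s.1.headD 0
  let new : Int :=
    if some x = PySem.List.pyGet? ([1, 2, 3, 1] : List Int) p then p + 1
    else if x = 1 then 1
    else 0
  if new = 4 then (s.1.drop 3, s.2 + 1)
  else (new :: s.1, s.2)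

def solution_alt (ingredient : List Int) : Int :=
  (ingredient.foldl solutionStepB ([], 0)).2

-- ===== PRECONDITION & SPEC =====
def Spec_solution (ingredient : List Int) (out : Int) : Prop := out = solution_alt ingredient
instance (ingredient : List Int) (out : Int) : Decidable (Spec_solution ingredient out) := by unfold Spec_solution; infer_instance

-- ===== CLAIM (what is proved, stated in full; the proofs are below) =====
def Claim_equal_solution : Prop := ∀ (ingredient : List Int), Dom_solution ingredient → Spec_solution ingredient (solution ingredient)

-- ===== LEMMAS AND PROOFS =====

-- the progress transition of B, as a plain function
def stepP (p x : Int) : Int :=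
  if some x = PySem.List.pyGet? ([1, 2, 3, 1] : List Int) p then p + 1
  else if x = 1 then 1
  else 0

-- progress stack of a reversed ingredient stack (head = most recent element)
def gstates : List Int → List Int
  | [] => []
  | x :: r => stepP ((gstates r).headD 0) x :: gstates r

def sFun (r : List Int) : Int := (gstates r).headD 0

-- `good r`: the reversed stack contains no occurrence of the (reversed) pattern
def good (r : List Int) : Prop := ¬ ([1, 3, 2, 1] : List Int) <:+: r

theorem sFun_cons (x : Int) (r : List Int) : sFun (x :: r) = stepP (sFun r) x := rfl

theorem gstates_drop (k : Nat) (r : List Int) :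
    (gstates r).drop k = gstates (r.drop k) := by
  induction r generalizing k with
  | nil => simp [gstates]
  | cons x r ih =>
    cases k with
    | zero => simp
    | succ k => simpa [gstates] using ih k

theorem good_of_good_cons {x : Int} {r : List Int} (h : good (x :: r)) : good r := by
  intro hc; exact h (hc.trans (List.suffix_cons x r).isInfix)

theorem good_drop {r : List Int} (k : Nat) (h : good r) : good (r.drop k) := by
  intro hc; exact h (hc.trans (List.drop_suffix k r).isInfix)

-- evaluated forms of the transition
theorem stepP_zero (x : Int) : stepP 0 x = if x = 1 then 1 else 0 := by
  simp [stepP, PySem.List.pyGet?, PySem.List.pyIdx?]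

theorem stepP_one (x : Int) : stepP 1 x = if x = 2 then 2 else if x = 1 then 1 else 0 := by
  simp [stepP, PySem.List.pyGet?, PySem.List.pyIdx?]

theorem stepP_two (x : Int) : stepP 2 x = if x = 3 then 3 else if x = 1 then 1 else 0 := by
  simp [stepP, PySem.List.pyGet?, PySem.List.pyIdx?]

theorem stepP_three (x : Int) : stepP 3 x = if x = 1 then 4 else 0 := by
  simp [stepP, PySem.List.pyGet?, PySem.List.pyIdx?]
  by_cases hx : x = 1 <;> simp [hx]

-- the semantic invariant on progress values
theorem sFun_char {r : List Int} (h : good r) :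
    (sFun r = 0 ∨ sFun r = 1 ∨ sFun r = 2 ∨ sFun r = 3) ∧
      (sFun r = 1 ↔ r.take 1 = [1]) ∧
      (sFun r = 2 ↔ r.take 2 = [2, 1]) ∧
      (sFun r = 3 ↔ r.take 3 = [3, 2, 1]) := by
  induction r with
  | nil => simp [sFun, gstates]
  | cons x r ih =>
    have hg := good_of_good_cons h
    obtain ⟨hmem, h1, h2, h3⟩ := ih hg
    rcases hmem with h0 | h0 | h0 | h0
    · rw [sFun_cons, h0, stepP_zero]
      by_cases hx : x = 1 <;> split_ifs <;> simp_all [List.take_succ_cons]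
    · rw [sFun_cons, h0, stepP_one]
      split_ifs <;> simp_all [List.take_succ_cons]
    · rw [sFun_cons, h0, stepP_two]
      split_ifs <;> simp_all [List.take_succ_cons]
    · have hr3 : r.take 3 = [3, 2, 1] := h3.mp h0
      have hx : x ≠ 1 := by
        intro hx
        apply h
        apply List.IsPrefix.isInfix
        subst hx
        have : ([3, 2, 1] : List Int) <+: r := by
          rw [← hr3]; exact List.take_prefix 3 r
        exact (List.cons_prefix_cons).mpr ⟨rfl, this⟩
      rw [sFun_cons, h0, stepP_three, if_neg hx]
      simp_all [List.take_succ_cons]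

theorem stepP_eq_four {p x : Int}
    (hp : p = 0 ∨ p = 1 ∨ p = 2 ∨ p = 3) :
    (stepP p x = 4 ↔ p = 3 ∧ x = 1) := by
  rcases hp with h | h | h | h <;> subst h <;>
    simp only [stepP_zero, stepP_one, stepP_two, stepP_three] <;>
    split_ifs <;> simp_all

-- A's fired condition, re-expressed on the reversed stack
theorem condA_iff {arr : List Int} {i : Int} (h : good arr.reverse) :
    (4 ≤ (arr ++ [i]).length ∧
        PySem.List.slice (arr ++ [i]) (some (((arr ++ [i]).length : Int) - 4)) none
          = ([1, 2, 3, 1] : List Int))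
      ↔ stepP (sFun arr.reverse) i = 4 := by
  obtain ⟨hmem, h1, h2, h3⟩ := sFun_char h
  rw [stepP_eq_four hmem, h3]
  by_cases hn : 3 ≤ arr.length
  · have hcast : (((arr ++ [i]).length : Int) - 4) = ((arr.length - 3 : Nat) : Int) := by
      simp; omega
    rw [hcast, PySem.List.slice_from_natCast]
    have hdrop : (arr ++ [i]).drop (arr.length - 3) = arr.drop (arr.length - 3) ++ [i] :=
      List.drop_append_of_le_length (by omega)
    have hrev : (arr.reverse).take 3 = (arr.drop (arr.length - 3)).reverse := by
      rw [List.reverse_drop]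
      congr 1
      omega
    have hlen3 : (arr.drop (arr.length - 3)).length = 3 := by
      simp; omega
    obtain ⟨a, b, c, habc⟩ := List.length_eq_three.mp hlen3
    rw [hdrop, habc, hrev, habc]
    constructor
    · rintro ⟨-, he⟩
      simp at he
      simp [he.1, he.2.1, he.2.2.1, he.2.2.2]
    · rintro ⟨he, hi⟩
      simp at he
      refine ⟨by simp; omega, by simp [he.1, he.2.1, he.2.2, hi]⟩
  · constructor
    · rintro ⟨hlen, -⟩
      exfalso
      simp at hlen
      omega
    · rintro ⟨he, -⟩
      exfalso
      have := congrArg List.length he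
      simp at this
      omega

-- the bisimulation relation
def BRel (a b : List Int × Int) : Prop :=
  a.2 = b.2 ∧ b.1 = gstates a.1.reverse ∧ good a.1.reverse

theorem BRel_step {a b : List Int × Int} (h : BRel a b) (i : Int) :
    BRel (solutionStepA a i) (solutionStepB b i) := by
  obtain ⟨hans, hst, hgood⟩ := h
  have hp : b.1.headD 0 = sFun a.1.reverse := by rw [hst]; rfl
  have hcond := condA_iff (arr := a.1) (i := i) hgood
  have hrev2 : (a.1 ++ [i]).reverse = i :: a.1.reverse := by simp
  by_cases hc : stepP (sFun a.1.reverse) i = 4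
  · -- both sides fire: A drops its last four, B pops three progress entries
    have hA : solutionStepA a i = ((a.1 ++ [i]).take ((a.1 ++ [i]).length - 4), a.2 + 1) := by
      unfold solutionStepA
      rw [if_pos (hcond.mpr hc)]
    have hB : solutionStepB b i = (b.1.drop 3, b.2 + 1) := by
      show (if stepP (b.1.headD 0) i = 4 then (b.1.drop 3, b.2 + 1)
            else (stepP (b.1.headD 0) i :: b.1, b.2)) = _
      rw [hp, if_pos hc]
    have hlen : 4 ≤ (a.1 ++ [i]).length := (hcond.mpr hc).1
    simp only [List.length_append, List.length_cons] at hlen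
    have htake : (a.1 ++ [i]).take ((a.1 ++ [i]).length - 4) = a.1.take (a.1.length - 3) := by
      have h4 : (a.1 ++ [i]).length - 4 = a.1.length - 3 := by simp
      rw [h4]
      exact List.take_append_of_le_length (by omega)
    have hrevtake : (a.1.take (a.1.length - 3)).reverse = a.1.reverse.drop 3 := by
      rw [List.reverse_take]
      congr 1
      simp at hlen ⊢
      omega
    refine ⟨by rw [hA, hB, hans], ?_, ?_⟩
    · rw [hA, hB, htake]
      simp only
      rw [hrevtake, ← gstates_drop]
      rw [hst]
    · rw [hA]
      simp only
      rw [htake, hrevtake]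
      exact good_drop 3 hgood
  · -- neither side fires: A pushes the ingredient, B pushes the new progress value
    have hA : solutionStepA a i = (a.1 ++ [i], a.2) := by
      unfold solutionStepA
      rw [if_neg (fun hx => hc (hcond.mp hx))]
    have hB : solutionStepB b i = (stepP (sFun a.1.reverse) i :: b.1, b.2) := by
      show (if stepP (b.1.headD 0) i = 4 then (b.1.drop 3, b.2 + 1)
            else (stepP (b.1.headD 0) i :: b.1, b.2)) = _
      rw [hp, if_neg hc]
    refine ⟨by rw [hA, hB, hans], ?_, ?_⟩
    · rw [hA, hB]
      simp only
      rw [hrev2, hst]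
      exact rfl
    · rw [hA]
      simp only
      rw [hrev2]
      intro hinf
      rcases List.infix_cons_iff.mp hinf with hpre | hinr
      · obtain ⟨hi1, hrest⟩ := List.cons_prefix_cons.mp hpre
        have h3 : sFun a.1.reverse = 3 := by
          have ht : a.1.reverse.take 3 = [3, 2, 1] := by
            obtain ⟨t, ht⟩ := hrest
            rw [← ht]
            simp
          exact ((sFun_char hgood).2.2.2).mpr ht
        apply hc
        rw [h3, ← hi1, stepP_three]
        simp
      · exact hgood hinr

theorem BRel_foldl (l : List Int) {a b : List Int × Int} (h : BRel a b) :
    BRel (l.foldl solutionStepA a) (l.foldl solutionStepB b) := by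
  induction l generalizing a b with
  | nil => exact h
  | cons x l ih => exact ih (BRel_step h x)

-- ===== VERDICT (by name: the statement is the Claim_ definition above) =====
theorem solution_spec : Claim_equal_solution := by
  intro ingredient _
  have h0 : BRel (([] : List Int), (0 : Int)) (([] : List Int), (0 : Int)) := by
    refine ⟨rfl, rfl, ?_⟩
    intro hc
    have := hc.length_le
    simp at this
  exact (BRel_foldl ingredient h0).1
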